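-- pv_equiv track=rewrite | github.com/csprw/contrastivePodcast | src/utils.py | get_sent_indexes
-- ===== SOURCE A (Python) =====
-- def get_sent_indexes(sentences):
--     """ Returns a list of tuples, with (starttime, endtime) for each sentence. """
--     indexes = []
--     lb = 0
--     ub = 0
--     for s in sentences:
--         extra_indexes = len(s.split())
--         ub += extra_indexes
--         indexes.append((lb, ub-1))
--         lb += extra_indexes
--     return indexes
-- ===== SOURCE B (Python) =====
-- def get_sent_indexes(sentences):
--     """ Returns a list of tuples, with (starttime, endtime) for each sentence. """
--     def solve(seq):
--         # returns (index pairs relative to seq's own first word, total word count of seq)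
--         if not seq:
--             return [], 0
--         if len(seq) == 1:
--             c = len(seq[0].split())
--             return [(0, c - 1)], c
--         mid = len(seq) // 2
--         left, lt = solve(seq[:mid])
--         right, rt = solve(seq[mid:])
--         return left + [(lb + lt, ub + lt) for lb, ub in right], lt + rt
--     return solve(sentences)[0]
-- ===== Notes on version B (the rewrite author's own statement) =====
-- stated objective: alternative
-- what changed: Replaces the forward lb/ub accumulator loop with a balanced divide-and-conquer: split the sentence list in halves, solve each half independently with indexes relative to its own first word, then shift the right half's pairs by the left half's word total and concatenate.
import Mathlib
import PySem

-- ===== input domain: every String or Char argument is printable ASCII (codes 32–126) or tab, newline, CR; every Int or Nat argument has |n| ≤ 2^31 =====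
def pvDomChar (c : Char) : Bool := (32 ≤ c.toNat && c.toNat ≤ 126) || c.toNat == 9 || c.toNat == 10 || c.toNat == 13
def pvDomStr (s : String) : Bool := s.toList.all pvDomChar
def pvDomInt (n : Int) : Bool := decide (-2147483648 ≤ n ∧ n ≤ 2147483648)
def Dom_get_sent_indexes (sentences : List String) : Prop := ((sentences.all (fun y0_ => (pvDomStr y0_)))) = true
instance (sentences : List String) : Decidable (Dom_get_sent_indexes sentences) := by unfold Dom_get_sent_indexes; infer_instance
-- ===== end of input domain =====

-- B replaces A's accumulator loop by a balanced divide-and-conquer (solve each half relative to its own first word, shift the right half by the left half's word total): an alternative decomposition, not faster.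

-- ===== PORT A =====
-- Port of A: one loop accumulating (lb, ub, indexes).
def get_sent_indexes (sentences : List String) : List (Int × Int) :=
  (sentences.foldl
    (fun (st : Int × Int × List (Int × Int)) s =>
      let extra : Int := (PySem.Str.split₀ s).length
      let ub := st.2.1 + extra
      (st.1 + extra, ub, st.2.2 ++ [(st.1, ub - 1)]))
    (0, 0, [])).2.2

-- ===== PORT B =====
-- Port of B: balanced divide-and-conquer; each half solved relative to its own first word,
-- right half shifted by left half's word total.
def pvSolve : List String → List (Int × Int) × Int
  | [] => ([], 0)
  | [s] =>
    let c : Int := (PySem.Str.split₀ s).length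
    ([(0, c - 1)], c)
  | s₁ :: s₂ :: rest =>
    let l := s₁ :: s₂ :: rest
    let mid := l.length / 2
    let L := pvSolve (l.take mid)
    let R := pvSolve (l.drop mid)
    (L.1 ++ R.1.map (fun p => (p.1 + L.2, p.2 + L.2)), L.2 + R.2)
termination_by l => l.length
decreasing_by
  · simp [List.length_take]; omega
  · simp [List.length_drop]; omega

def get_sent_indexes_alt (sentences : List String) : List (Int × Int) :=
  (pvSolve sentences).1

-- ===== PRECONDITION & SPEC =====
def Spec_get_sent_indexes (sentences : List String) (out : List (Int × Int)) : Prop := out = get_sent_indexes_alt sentences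
instance (sentences : List String) (out : List (Int × Int)) : Decidable (Spec_get_sent_indexes sentences out) := by unfold Spec_get_sent_indexes; infer_instance

-- ===== CLAIM (what is proved, stated in full; the proofs are below) =====
def Claim_equal_get_sent_indexes : Prop := ∀ (sentences : List String), Dom_get_sent_indexes sentences → Spec_get_sent_indexes sentences (get_sent_indexes sentences)

-- ===== LEMMAS AND PROOFS =====
-- common normal form: one pair per count with running offset a
def pvG (counts : List Int) (a : Int) : List (Int × Int) :=
  match counts with
  | [] => []
  | c :: t => (a, a + c - 1) :: pvG t (a + c)

lemma pvA_loop (l : List String) : ∀ (a : Int) (acc : List (Int × Int)),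
    (l.foldl
      (fun (st : Int × Int × List (Int × Int)) s =>
        let extra : Int := (PySem.Str.split₀ s).length
        let ub := st.2.1 + extra
        (st.1 + extra, ub, st.2.2 ++ [(st.1, ub - 1)]))
      (a, a, acc)).2.2
      = acc ++ pvG (l.map (fun s => ((PySem.Str.split₀ s).length : Int))) a := by
  induction l with
  | nil => intro a acc; simp [pvG]
  | cons s t ih =>
      intro a acc
      simp only [List.foldl_cons, List.map_cons, pvG]
      rw [ih]
      simp

lemma pvG_shift (counts : List Int) : ∀ (a d : Int),
    (pvG counts a).map (fun p => (p.1 + d, p.2 + d)) = pvG counts (a + d) := by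
  induction counts with
  | nil => intro a d; simp [pvG]
  | cons c t ih =>
      intro a d
      simp only [pvG, List.map_cons, ih]
      congr 2 <;> ring

lemma pvG_append (x y : List Int) : ∀ (a : Int),
    pvG (x ++ y) a = pvG x a ++ pvG y (a + x.sum) := by
  induction x with
  | nil => intro a; simp [pvG]
  | cons c t ih =>
      intro a
      simp only [List.cons_append, pvG, ih, List.sum_cons]
      have h : a + c + t.sum = a + (c + t.sum) := by ring
      rw [h]

def pvCnts (l : List String) : List Int := l.map (fun s => ((PySem.Str.split₀ s).length : Int))

lemma pvSolve_eq (l : List String) : pvSolve l = (pvG (pvCnts l) 0, (pvCnts l).sum) := by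
  induction l using pvSolve.induct with
  | case1 => simp [pvSolve, pvCnts, pvG]
  | case2 s => simp [pvSolve, pvCnts, pvG]
  | case3 s₁ s₂ rest lv mv ihL ihR =>
      rw [pvSolve]
      simp only at lv mv ihL ihR
      rw [ihL, ihR]
      have hsplit : pvCnts (s₁ :: s₂ :: rest)
          = pvCnts ((s₁ :: s₂ :: rest).take ((s₁ :: s₂ :: rest).length / 2))
            ++ pvCnts ((s₁ :: s₂ :: rest).drop ((s₁ :: s₂ :: rest).length / 2)) := by
        simp [pvCnts]
      rw [hsplit, pvG_append, List.sum_append, pvG_shift]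

lemma pvB_eq (l : List String) :
    get_sent_indexes_alt l = pvG (l.map (fun s => ((PySem.Str.split₀ s).length : Int))) 0 := by
  rw [get_sent_indexes_alt, pvSolve_eq]; rfl

-- ===== VERDICT (by name: the statement is the Claim_ definition above) =====
theorem get_sent_indexes_spec : Claim_equal_get_sent_indexes := by
  intro sentences _
  unfold Spec_get_sent_indexes get_sent_indexes
  rw [pvA_loop, pvB_eq]
  simp
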